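-- pv_equiv track=rewrite | github.com/djgagne/hagelslag | hagelslag/data/ModelGrid.py | format_var_name
-- ===== SOURCE A (Python) =====
-- def format_var_name(variable, var_list):
--     """
--     Searches var list for variable name, checks other variable name format options.
--
--     Args:
--         variable (str): Variable being loaded
--         var_list (list): List of variables in file.
--
--     Returns:
--         Name of variable in file containing relevant data, and index of variable z-level if multiple variables
--         contained in same array in file.
--     """
--     z_index = None
--     if variable in var_list:
--         var_name = variable
--     elif variable.ljust(6, "_") in var_list:
--         var_name = variable.ljust(6, "_")
--     elif any([variable in v_sub.split("_") for v_sub in var_list]):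
--         var_name = var_list[[variable in v_sub.split("_") for v_sub in var_list].index(True)]
--         z_index = var_name.split("_").index(variable)
--     else:
--         raise KeyError("{0} not found in {1}".format(variable, var_list))
--     return var_name, z_index
-- ===== SOURCE B (Python) =====
-- def format_var_name(variable, var_list):
--     """Single classify-then-resolve pass instead of up to three sequential scans."""
--     padded = variable.ljust(6, "_")
--     exact = pad = split = None
--     for v_sub in var_list:
--         if exact is None and v_sub == variable:
--             exact = v_sub
--         if pad is None and v_sub == padded:
--             pad = v_sub
--         if split is None and variable in v_sub.split("_"):
--             split = v_sub
--     if exact is not None: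
--         return variable, None
--     if pad is not None:
--         return padded, None
--     if split is not None:
--         return split, split.split("_").index(variable)
--     raise KeyError("{0} not found in {1}".format(variable, var_list))
-- ===== Notes on version B (the rewrite author's own statement) =====
-- stated objective: alternative
-- what changed: Replaces A's up-to-three sequential scans (membership, padded membership, any+list.index over a rebuilt flag list) with one pass over var_list that records the first exact, padded and split match and resolves the priority afterwards.
import Mathlib
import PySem

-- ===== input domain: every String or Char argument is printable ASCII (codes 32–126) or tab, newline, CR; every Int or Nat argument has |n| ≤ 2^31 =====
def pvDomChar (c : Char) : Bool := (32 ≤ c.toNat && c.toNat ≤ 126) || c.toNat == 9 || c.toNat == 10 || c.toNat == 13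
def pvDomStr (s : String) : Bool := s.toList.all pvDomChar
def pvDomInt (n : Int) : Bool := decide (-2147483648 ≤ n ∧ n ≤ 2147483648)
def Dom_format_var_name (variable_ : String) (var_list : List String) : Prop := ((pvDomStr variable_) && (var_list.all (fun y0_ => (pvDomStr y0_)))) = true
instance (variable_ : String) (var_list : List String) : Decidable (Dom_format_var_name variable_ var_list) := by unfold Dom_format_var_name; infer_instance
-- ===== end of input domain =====

-- B replaces A's up-to-three sequential scans with one classify-then-resolve pass over var_list (alternative decomposition, same cost).


-- shared stdlib helpers (both Pythons call the same built-ins)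
-- s.ljust(6, "_"): hand port, exact — pads with '_' on the right up to length 6
def pyLjust6 (s : String) : String := String.ofList (s.toList ++ List.replicate (6 - s.toList.length) '_')
-- s.split("_"): exact, sep ≠ "" so split? is always some
def splitU (s : String) : List String := (PySem.Str.split? s "_").getD []

-- ===== PORT A =====
def format_var_name (variable_ : String) (var_list : List String) : String × Option Int :=
  if variable_ ∈ var_list then (variable_, none)
  else if pyLjust6 variable_ ∈ var_list then (pyLjust6 variable_, none)
  else
    -- [variable in v_sub.split("_") for v_sub in var_list] and its .index(True)
    match PySem.List.index? (var_list.map (fun v_sub => decide (variable_ ∈ splitU v_sub))) true with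
    | some i =>
        let var_name := var_list.getD i ""
        (var_name, (PySem.List.index? (splitU var_name) variable_).map (fun k => (k : Int)))
    | none => ("", none)  -- KeyError: excluded by Pre_

-- ===== PORT B =====
-- one pass recording the first exact / padded / split match
def scan3 (variable_ padded : String) : List String → (Option String × Option String × Option String) → Option String × Option String × Option String
  | [], st => st
  | v :: rest, (e, pd, sp) =>
      scan3 variable_ padded rest
        (if e.isNone && v == variable_ then some v else e,
         if pd.isNone && v == padded then some v else pd,
         if sp.isNone && decide (variable_ ∈ splitU v) then some v else sp)

def format_var_name_alt (variable_ : String) (var_list : List String) : String × Option Int :=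
  match scan3 variable_ (pyLjust6 variable_) var_list (none, none, none) with
  | (some _, _, _) => (variable_, none)
  | (none, some _, _) => (pyLjust6 variable_, none)
  | (none, none, some w) => (w, (PySem.List.index? (splitU w) variable_).map (fun k => (k : Int)))
  | (none, none, none) => ("", none)  -- KeyError: excluded by Pre_

-- ===== PRECONDITION & SPEC =====
-- Pre_ excludes exactly the inputs on which A raises KeyError (no match of any kind); B raises there too.
def Pre_format_var_name (variable_ : String) (var_list : List String) : Prop :=
  variable_ ∈ var_list ∨ pyLjust6 variable_ ∈ var_list ∨ ∃ v ∈ var_list, variable_ ∈ splitU v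
instance (variable_ : String) (var_list : List String) : Decidable (Pre_format_var_name variable_ var_list) := by unfold Pre_format_var_name; infer_instance
def pvWitness_format_var_name : String × List String := ("CAPE", ["X", "CAPE_1"])

def Spec_format_var_name (variable_ : String) (var_list : List String) (out : String × Option Int) : Prop := out = format_var_name_alt variable_ var_list
instance (variable_ : String) (var_list : List String) (out : String × Option Int) : Decidable (Spec_format_var_name variable_ var_list out) := by unfold Spec_format_var_name; infer_instance

-- ===== CLAIM (what is proved, stated in full; the proofs are below) =====
def Claim_equal_format_var_name : Prop := ∀ (variable_ : String) (var_list : List String), Dom_format_var_name variable_ var_list → Pre_format_var_name variable_ var_list → Spec_format_var_name variable_ var_list (format_var_name variable_ var_list)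

-- ===== LEMMAS AND PROOFS =====

theorem scan3_spec (variable_ padded : String) (l : List String) (e pd sp : Option String) :
    scan3 variable_ padded l (e, pd, sp) =
      (e.orElse (fun _ => if variable_ ∈ l then some variable_ else none),
       pd.orElse (fun _ => if padded ∈ l then some padded else none),
       sp.orElse (fun _ => l.find? (fun v => decide (variable_ ∈ splitU v)))) := by
  induction l generalizing e pd sp with
  | nil => cases e <;> cases pd <;> cases sp <;> simp [scan3]
  | cons v rest ih =>
    simp only [scan3, ih]
    congr 1
    · cases e with
      | some x => simp
      | none =>
        by_cases h : v = variable_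
        · simp [h]
        · simp [List.mem_cons, h, Ne.symm h]
    congr 1
    · cases pd with
      | some x => simp
      | none =>
        by_cases h : v = padded
        · simp [h]
        · simp [List.mem_cons, h, Ne.symm h]
    · cases sp with
      | some x => simp
      | none =>
        by_cases h : variable_ ∈ splitU v <;> simp [h]

theorem index_flag_eq_find (variable_ : String) (l : List String) :
    (match PySem.List.index? (l.map (fun v => decide (variable_ ∈ splitU v))) true with
     | some i => some (l.getD i "")
     | none => (none : Option String)) = l.find? (fun v => decide (variable_ ∈ splitU v)) := by
  induction l with
  | nil => simp [PySem.List.index?]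
  | cons v rest ih =>
    by_cases h : variable_ ∈ splitU v
    · simp [h, PySem.List.index?_eq_idxOf?, List.idxOf?_cons]
    · rw [List.map_cons]
      have hv : (decide (variable_ ∈ splitU v)) ≠ true := by simp [h]
      rw [PySem.List.index?_cons_of_ne _ hv]
      rw [List.find?_cons]
      simp only [h, decide_false]
      rw [← ih]
      cases hidx : PySem.List.index? (rest.map (fun v => decide (variable_ ∈ splitU v))) true with
      | some i => simp
      | none => simp

-- ===== VERDICT (by name: the statement is the Claim_ definition above) =====
theorem format_var_name_spec : Claim_equal_format_var_name := by
  intro variable_ var_list _ hpre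
  unfold Spec_format_var_name format_var_name format_var_name_alt
  rw [scan3_spec]
  by_cases h1 : variable_ ∈ var_list
  · simp [h1]
  · by_cases h2 : pyLjust6 variable_ ∈ var_list
    · simp [h1, h2]
    · simp only [h1, h2, if_false, Option.orElse]
      rw [← index_flag_eq_find]
      cases hidx : PySem.List.index? (var_list.map (fun v => decide (variable_ ∈ splitU v))) true with
      | some i => simp
      | none =>
        exfalso
        rcases hpre with h | h | ⟨v, hv, hmem⟩
        · exact h1 h
        · exact h2 h
        · have hm : (true : Bool) ∈ var_list.map (fun v => decide (variable_ ∈ splitU v)) := by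
            simp only [List.mem_map]
            exact ⟨v, hv, by simp [hmem]⟩
          rw [← PySem.List.index?_isSome_iff] at hm
          rw [hidx] at hm
          simp at hm
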